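-- pv_equiv track=rewrite | github.com/kurgm/gwv | gwv/validators/dup.py | ineighbors
-- ===== SOURCE A (Python) =====
-- from typing import Iterable, Iterator, List, NamedTuple, Tuple, TypeVar
--
-- T = TypeVar("T")
--
-- def ineighbors(iterable: Iterable[T]) -> Iterator[Tuple[T, T]]:
--     iterator = iter(iterable)
--     try:
--         p = next(iterator)
--         while True:
--             n = next(iterator)
--             yield (p, n)
--             p = n
--     except StopIteration:
--         return
-- ===== SOURCE B (Python) =====
-- from itertools import islice
--
-- def ineighbors(iterable):
--     xs = list(iterable)
--     yield from zip(xs, islice(xs, 1, None))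
-- ===== Notes on version B (the rewrite author's own statement) =====
-- stated objective: idiomatic
-- what changed: Replaced the manual next()/previous-state while loop with zip of the sequence against itself offset by one (zip + islice), keeping no explicit loop state.
import Mathlib
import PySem

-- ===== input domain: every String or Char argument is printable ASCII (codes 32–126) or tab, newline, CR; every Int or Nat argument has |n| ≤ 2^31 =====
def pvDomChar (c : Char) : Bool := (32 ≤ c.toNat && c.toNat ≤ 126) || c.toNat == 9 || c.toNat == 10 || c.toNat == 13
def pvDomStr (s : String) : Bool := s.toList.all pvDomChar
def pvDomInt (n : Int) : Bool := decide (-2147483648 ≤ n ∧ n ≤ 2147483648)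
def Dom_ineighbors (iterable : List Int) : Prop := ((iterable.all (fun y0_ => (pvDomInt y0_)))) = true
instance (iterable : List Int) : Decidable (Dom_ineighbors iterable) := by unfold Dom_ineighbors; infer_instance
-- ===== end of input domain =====

-- B replaces the manual next()/previous-state loop with zip of the list against itself offset by one (idiomatic, same cost).
-- ===== PORT A =====
-- loop: p is the previous element; each next element n yields (p, n) and becomes the new p
def ineighborsLoop (p : Int) : List Int → List (Int × Int)
  | [] => []
  | n :: rest => (p, n) :: ineighborsLoop n rest

def ineighbors (iterable : List Int) : List (Int × Int) :=
  match iterable with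
  | [] => []
  | p :: rest => ineighborsLoop p rest

-- ===== PORT B =====
-- B: zip the list with itself shifted by one (zip + islice in Python)
def ineighbors_alt (iterable : List Int) : List (Int × Int) :=
  iterable.zip (iterable.drop 1)

-- ===== PRECONDITION & SPEC =====
def Spec_ineighbors (iterable : List Int) (out : List (Int × Int)) : Prop := out = ineighbors_alt iterable
instance (iterable : List Int) (out : List (Int × Int)) : Decidable (Spec_ineighbors iterable out) := by unfold Spec_ineighbors; infer_instance

-- ===== CLAIM (what is proved, stated in full; the proofs are below) =====
def Claim_equal_ineighbors : Prop := ∀ (iterable : List Int), Dom_ineighbors iterable → Spec_ineighbors iterable (ineighbors iterable)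

-- ===== LEMMAS AND PROOFS =====

-- ===== VERDICT (by name: the statement is the Claim_ definition above) =====
theorem ineighborsLoop_zip (p : Int) (xs : List Int) :
    ineighborsLoop p xs = (p :: xs).zip xs := by
  induction xs generalizing p with
  | nil => rfl
  | cons n rest ih => simp [ineighborsLoop, ih]

-- ===== VERDICT =====
theorem ineighbors_spec : Claim_equal_ineighbors := by
  intro iterable _
  unfold Spec_ineighbors ineighbors ineighbors_alt
  cases iterable with
  | nil => rfl
  | cons p rest => simpa using ineighborsLoop_zip p rest
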